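-- pv_equiv track=rewrite | github.com/rdefeo/adventofcode | 2018/day9/day9.py | marble_game
-- ===== SOURCE A (Python) =====
-- import collections
--
-- class Marble:
--     def __init__(self,value):
--         self.value = value
--         self.next = self
--         self.prev = self
--
-- def marble_game(num_players,last_marble):
--     current = Marble(0)
--     #print_marbles(current)
--
--     player = collections.defaultdict(int)
--     for m in range(1,last_marble+1):
--         if m % 23 != 0:
--             left = current.next
--             right = current.next.next
--             marble = Marble(m)
--             marble.next = right
--             right.prev = marble
--             left.next = marble
--             marble.prev = left
--             current = marble
--         else:
--             player[m%num_players] += m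
--             for _ in range(7):
--                 current = current.prev
--             player[m%num_players] += current.value
--             nc = current.next
--             current.prev.next = nc
--             nc.prev = current.prev
--             current = nc
--         #print_marbles(current)
--     return max(player.items(),key=lambda x:x[1])
-- ===== SOURCE B (Python) =====
-- import collections
--
-- def marble_game(num_players, last_marble):
--     # Batched simulation: the circle is kept in clockwise order with the current
--     # marble at the RIGHT end.  A whole run of non-scoring marbles m..run_end is
--     # spliced in chunk-wise: a chunk of t <= len(circle) insertions is one
--     # interleave of the t front marbles with the t new marbles, appended at the
--     # right.  A scoring marble is handled by popping the last 8 marbles once: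
--     # the one 7 counter-clockwise of current is scored, the rest are re-attached.
--     player = collections.defaultdict(int)
--     circle = collections.deque([0])
--     m = 1
--     while m <= last_marble:
--         if m % 23 != 0:
--             run_end = min(last_marble, (m // 23) * 23 + 22)
--             while m <= run_end:
--                 t = min(len(circle), run_end - m + 1)
--                 merged = []
--                 for _ in range(t):
--                     merged.append(circle.popleft())
--                     merged.append(m)
--                     m += 1
--                 circle.extend(merged)
--         else:
--             s = [circle.pop() for _ in range(8)]   # s = [s8, s7, ..., s2, s1]
--             player[m % num_players] += m + s[7]    # s1 is scored and removed
--             circle.append(s[6])                    # s2 becomes the current marble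
--             circle.extendleft(s[0:6])              # s3..s8 move to the front
--             m += 1
--     return max(player.items(), key=lambda x: x[1])
-- ===== Notes on version B (the rewrite author's own statement) =====
-- stated objective: alternative
-- what changed: Replaces the per-marble doubly-linked-list pointer surgery with batched processing: each run of up to 22 non-scoring marbles is spliced into the circle chunk-wise by interleaving popped front marbles with the new marbles in one pass, and each scoring marble pops the last 8 marbles once and re-attaches them, keeping the same defaultdict scoring and max tie-breaking.
import Mathlib
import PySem

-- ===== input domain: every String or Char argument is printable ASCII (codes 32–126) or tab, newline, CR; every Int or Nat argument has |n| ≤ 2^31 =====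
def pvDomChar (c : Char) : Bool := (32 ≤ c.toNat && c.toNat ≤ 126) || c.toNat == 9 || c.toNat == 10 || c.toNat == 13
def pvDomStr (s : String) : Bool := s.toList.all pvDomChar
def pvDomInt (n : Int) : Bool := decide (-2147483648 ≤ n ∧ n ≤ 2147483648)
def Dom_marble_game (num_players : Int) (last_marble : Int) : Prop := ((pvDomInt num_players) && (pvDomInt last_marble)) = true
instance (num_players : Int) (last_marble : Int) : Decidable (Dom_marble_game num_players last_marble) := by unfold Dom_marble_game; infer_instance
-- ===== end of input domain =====

-- B replaces A's per-marble doubly-linked-list pointer surgery by batched list splicing: whole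
-- runs of non-scoring marbles are spliced in by one interleave per chunk, scoring marbles are
-- handled by pure negative-index slicing.  Same scoring dict and max tie-breaking.

-- ===== PORT A =====
-- A's circular doubly-linked Marble ring, read from `current` along `.next`, is modelled as a
-- two-stack pair (front, back): the cyclic order from the current marble is front ++ back.reverse,
-- so every O(1) pointer operation of A stays amortized O(1).

def pvRotFwd (z : List Int × List Int) : List Int × List Int :=   -- current = current.next
  match z.1 with
  | c :: t => (t, c :: z.2)
  | [] =>
    match z.2.reverse with
    | [] => ([], [])
    | c :: t => (t, [c])

def pvRotBwd (z : List Int × List Int) : List Int × List Int :=   -- current = current.prev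
  match z.2 with
  | p :: lt => (p :: z.1, lt)
  | [] =>
    match z.1.reverse with
    | [] => ([], [])
    | x :: rest => ([x], rest)

def pvCurA (z : List Int × List Int) : Int :=                    -- current.value
  match z.1 with
  | c :: _ => c
  | [] => (z.2.reverse).headD 0

def pvUnlinkA (z : List Int × List Int) : List Int × List Int := -- unlink current; current = nc
  match z.1 with
  | _ :: t => (t, z.2)
  | [] =>
    match z.2.reverse with
    | [] => ([], [])
    | _ :: t => (t, [])

def pvStepA (num_players : Int) (s : (List Int × List Int) × PySem.Dict Int Int) (m : Int) :
    (List Int × List Int) × PySem.Dict Int Int :=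
  if PySem.Int.mod m 23 ≠ 0 then
    -- left = current.next; right = current.next.next; splice the marble between them and
    -- make it current: step to `right`, then place m in front of it
    let z2 := pvRotFwd (pvRotFwd s.1)
    ((m :: z2.1, z2.2), s.2)
  else
    -- player[m % num_players] += m   (defaultdict(int))
    let p1 := s.2.modify (PySem.Int.mod m num_players) 0 (· + m)
    -- for _ in range(7): current = current.prev
    let z7 := pvRotBwd^[7] s.1
    -- player[m % num_players] += current.value
    let p2 := p1.modify (PySem.Int.mod m num_players) 0 (· + pvCurA z7)
    (pvUnlinkA z7, p2)

def marble_game (num_players : Int) (last_marble : Int) : Int × Int :=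
  -- max(player.items(), key=lambda x: x[1]); none = ValueError on an empty dict, excluded by Pre_
  (PySem.List.max? ((PySem.List.pyRange 1 (last_marble + 1) 1).foldl
    (pvStepA num_players) (([0], []), PySem.Dict.empty)).2.items (fun x => x.2)).getD (0, 0)

-- ===== PORT B =====
-- Source B's circle is a plain list, clockwise, current marble at the RIGHT end.

def pvInterleave : List Int → List Int → List Int   -- the zip/append loop building `merged`
  | x :: xs, y :: ys => x :: y :: pvInterleave xs ys
  | _, _ => []

-- inner `while m <= run_end` loop (t popleft+append pairs then one extend = drop t ++
-- interleave); fuel = (run_end + 1 - m).toNat at the call is only a totality guard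
-- (each pass advances m by t ≥ 1 whenever the circle is nonempty)
def pvRunB : Nat → Int → Int → List Int → List Int × Int
  | 0, m, _, circle => (circle, m)
  | f + 1, m, run_end, circle =>
    if m ≤ run_end then
      -- t = min(len(circle), run_end - m + 1); the .toNat is exact: m ≤ run_end here
      let t : Nat := min circle.length (run_end - m + 1).toNat
      pvRunB f (m + t) run_end
        (circle.drop t ++ pvInterleave (circle.take t) (PySem.List.pyRange m (m + (t : Int)) 1))
    else (circle, m)

-- outer `while m <= last_marble` loop; fuel = last_marble.toNat is only a totality guard
def pvLoopB (np : Int) : Nat → Int → Int → List Int → PySem.Dict Int Int → PySem.Dict Int Int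
  | 0, _, _, _, player => player
  | f + 1, m, lm, circle, player =>
    if m ≤ lm then
      if PySem.Int.mod m 23 ≠ 0 then
        let run_end := min lm (PySem.Int.floordiv m 23 * 23 + 22)
        let r := pvRunB (run_end + 1 - m).toNat m run_end circle
        pvLoopB np f r.2 lm r.1 player
      else
        -- s = [circle.pop() for _ in range(8)]: the last 8 marbles, last popped first
        -- (IndexError on a circle of < 8 marbles is unreachable: every scoring step sees
        -- ≥ 23 marbles, so the .getD 0 defaults never fire)
        let s := (circle.drop (circle.length - 8)).reverse
        let scored := (PySem.List.pyGet? s 7).getD 0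
        pvLoopB np f (m + 1) lm
          -- circle.append(s[6]); circle.extendleft(s[0:6])
          ((s.take 6).reverse ++ circle.take (circle.length - 8) ++
            [(PySem.List.pyGet? s 6).getD 0])
          (player.modify (PySem.Int.mod m np) 0 (· + (m + scored)))
    else player

def marble_game_alt (num_players : Int) (last_marble : Int) : Int × Int :=
  (PySem.List.max? (pvLoopB num_players last_marble.toNat 1 last_marble [0]
    PySem.Dict.empty).items (fun x => x.2)).getD (0, 0)

-- ===== PRECONDITION & SPEC =====
-- Exactly where Python A returns: last_marble < 23 leaves the player dict empty (max raises
-- ValueError, in B too) and num_players = 0 raises ZeroDivisionError at m = 23 (in B too).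
def Pre_marble_game (num_players : Int) (last_marble : Int) : Prop :=
  num_players ≠ 0 ∧ 23 ≤ last_marble
instance (num_players : Int) (last_marble : Int) : Decidable (Pre_marble_game num_players last_marble) := by unfold Pre_marble_game; infer_instance

def pvWitness_marble_game : Int × Int := (9, 25)

def Spec_marble_game (num_players : Int) (last_marble : Int) (out : Int × Int) : Prop := out = marble_game_alt num_players last_marble
instance (num_players : Int) (last_marble : Int) (out : Int × Int) : Decidable (Spec_marble_game num_players last_marble out) := by unfold Spec_marble_game; infer_instance

-- ===== CLAIM (what is proved, stated in full; the proofs are below) =====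
def Claim_equal_marble_game : Prop := ∀ (num_players : Int) (last_marble : Int), Dom_marble_game num_players last_marble → Pre_marble_game num_players last_marble → Spec_marble_game num_players last_marble (marble_game num_players last_marble)

-- ===== LEMMAS AND PROOFS =====

-- the cyclic sequence A's two-stack pair denotes
def pvRepr (z : List Int × List Int) : List Int := z.1 ++ z.2.reverse

-- abstract single-list model: one left / right rotation of the cycle
def pvRotL (d : List Int) : List Int :=
  match d with
  | [] => []
  | h :: t => t ++ [h]

def pvRotR1 (d : List Int) : List Int :=
  match d.getLast? with
  | none => []
  | some x => x :: d.dropLast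

-- abstract single-list version of A's step (ring read from `current`)
def pvAbsStepA (num_players : Int) (s : List Int × PySem.Dict Int Int) (m : Int) :
    List Int × PySem.Dict Int Int :=
  if PySem.Int.mod m 23 ≠ 0 then
    (m :: pvRotL (pvRotL s.1), s.2)
  else
    let p1 := s.2.modify (PySem.Int.mod m num_players) 0 (· + m)
    let r1 := pvRotR1^[7] s.1
    let p2 := p1.modify (PySem.Int.mod m num_players) 0 (· + r1.headD 0)
    (r1.tail, p2)

-- abstract per-marble step of B (circle with current at the right end)
def pvAbsStepB (num_players : Int) (s : List Int × PySem.Dict Int Int) (m : Int) :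
    List Int × PySem.Dict Int Int :=
  if PySem.Int.mod m 23 ≠ 0 then
    (pvRotL s.1 ++ [m], s.2)
  else
    let d1 := pvRotR1^[7] s.1
    let p := s.2.modify (PySem.Int.mod m num_players) 0 (· + (m + (d1.getLast?).getD 0))
    (pvRotL d1.dropLast, p)

-- ---- A's two-stack primitives denote the abstract rotations ----
theorem pvRepr_rotFwd (z : List Int × List Int) : pvRepr (pvRotFwd z) = pvRotL (pvRepr z) := by
  obtain ⟨F, B⟩ := z
  cases F with
  | cons c t => simp [pvRotFwd, pvRepr, pvRotL]
  | nil =>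
    cases h : B.reverse with
    | nil => simp [pvRotFwd, pvRepr, pvRotL, h]
    | cons c t => simp [pvRotFwd, pvRepr, pvRotL, h]

theorem pvRepr_rotBwd (z : List Int × List Int) : pvRepr (pvRotBwd z) = pvRotR1 (pvRepr z) := by
  obtain ⟨F, B⟩ := z
  cases hB : B with
  | cons p lt =>
    simp only [pvRotBwd, pvRepr, pvRotR1]
    simp
  | nil =>
    cases hF : F.reverse with
    | nil =>
      have : F = [] := by simpa using congrArg List.reverse hF
      simp [pvRotBwd, pvRepr, pvRotR1, this]
    | cons x rest =>
      have hF' : F = rest.reverse ++ [x] := by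
        have := congrArg List.reverse hF
        simpa using this
      simp [pvRotBwd, pvRepr, pvRotR1, hF']

theorem pvRepr_rotBwd_iter (n : Nat) (z : List Int × List Int) :
    pvRepr (pvRotBwd^[n] z) = pvRotR1^[n] (pvRepr z) := by
  induction n generalizing z with
  | zero => rfl
  | succ k ih =>
    rw [Function.iterate_succ_apply, Function.iterate_succ_apply, ih, pvRepr_rotBwd]

theorem pvCurA_eq (z : List Int × List Int) : pvCurA z = (pvRepr z).headD 0 := by
  obtain ⟨F, B⟩ := z
  cases F <;> simp [pvCurA, pvRepr]

theorem pvRepr_unlink (z : List Int × List Int) : pvRepr (pvUnlinkA z) = (pvRepr z).tail := by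
  obtain ⟨F, B⟩ := z
  cases F with
  | cons c t => simp [pvUnlinkA, pvRepr]
  | nil =>
    cases h : B.reverse with
    | nil => simp [pvUnlinkA, pvRepr, h]
    | cons c t => simp [pvUnlinkA, pvRepr, h]

-- A's step simulates its abstract single-list step
theorem pvStepA_sim (np m : Int) (z : List Int × List Int) (P : PySem.Dict Int Int) :
    pvAbsStepA np (pvRepr z, P) m = (pvRepr (pvStepA np (z, P) m).1, (pvStepA np (z, P) m).2) := by
  unfold pvAbsStepA pvStepA
  by_cases h : PySem.Int.mod m 23 ≠ 0
  · rw [if_pos h, if_pos h]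
    have hm : pvRepr (m :: (pvRotFwd (pvRotFwd z)).1, (pvRotFwd (pvRotFwd z)).2)
        = m :: pvRotL (pvRotL (pvRepr z)) := by
      calc pvRepr (m :: (pvRotFwd (pvRotFwd z)).1, (pvRotFwd (pvRotFwd z)).2)
          = m :: pvRepr (pvRotFwd (pvRotFwd z)) := by simp [pvRepr]
        _ = m :: pvRotL (pvRotL (pvRepr z)) := by rw [pvRepr_rotFwd, pvRepr_rotFwd]
    rw [hm]
  · rw [if_neg h, if_neg h]
    simp only [pvRepr_unlink, pvRepr_rotBwd_iter, pvCurA_eq]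

theorem pvFoldA_sim (np : Int) (L : List Int) : ∀ (z : List Int × List Int) (P : PySem.Dict Int Int),
    L.foldl (pvAbsStepA np) (pvRepr z, P) =
      (pvRepr (L.foldl (pvStepA np) (z, P)).1, (L.foldl (pvStepA np) (z, P)).2) := by
  induction L with
  | nil => intro z P; rfl
  | cons m t ih =>
    intro z P
    simp only [List.foldl_cons, pvStepA_sim]
    have := ih (pvStepA np (z, P) m).1 (pvStepA np (z, P) m).2
    simpa using this

-- ---- relating the two abstract steps: B's circle is A's ring rotated one position left ----
theorem pvRotR1_rotL (l : List Int) : pvRotR1 (pvRotL l) = l := by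
  cases l with
  | nil => rfl
  | cons h t => simp [pvRotL, pvRotR1]

theorem pvRotR1_headD (l : List Int) : (pvRotR1 l).headD 0 = (l.getLast?).getD 0 := by
  unfold pvRotR1
  cases h : l.getLast? <;> simp

theorem pvRotR1_tail (l : List Int) : (pvRotR1 l).tail = l.dropLast := by
  unfold pvRotR1
  cases h : l.getLast? with
  | none => simp [List.getLast?_eq_none_iff.mp h]
  | some x => simp

theorem pvModify_modify (d : PySem.Dict Int Int) (k a b : Int) :
    (d.modify k 0 (· + a)).modify k 0 (· + b) = d.modify k 0 (· + (a + b)) := by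
  simp [PySem.Dict.modify, PySem.Dict.getD_insert_self, PySem.Dict.insert_insert_self, add_assoc]

theorem pvStep_comm (np m : Int) (R : List Int) (P : PySem.Dict Int Int) :
    pvAbsStepB np (pvRotL R, P) m =
      (pvRotL (pvAbsStepA np (R, P) m).1, (pvAbsStepA np (R, P) m).2) := by
  unfold pvAbsStepA pvAbsStepB
  by_cases h : PySem.Int.mod m 23 ≠ 0
  · rw [if_pos h, if_pos h]
    simp [pvRotL]
  · rw [if_neg h, if_neg h]
    have hD1 : pvRotR1^[7] (pvRotL R) = pvRotR1^[6] R := by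
      rw [Function.iterate_succ_apply, pvRotR1_rotL]
    have hr1 : pvRotR1^[7] R = pvRotR1 (pvRotR1^[6] R) :=
      Function.iterate_succ_apply' pvRotR1 6 R
    simp only [hD1, hr1, pvRotR1_headD, pvRotR1_tail, pvModify_modify]

theorem pvFold_comm (np : Int) (L : List Int) : ∀ (R : List Int) (P : PySem.Dict Int Int),
    L.foldl (pvAbsStepB np) (pvRotL R, P) =
      (pvRotL (L.foldl (pvAbsStepA np) (R, P)).1, (L.foldl (pvAbsStepA np) (R, P)).2) := by
  induction L with
  | nil => intro R P; rfl
  | cons m t ih =>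
    intro R P
    simp only [List.foldl_cons, pvStep_comm]
    have := ih (pvAbsStepA np (R, P) m).1 (pvAbsStepA np (R, P) m).2
    simpa using this

-- ---- B's chunked splice = iterated single insertions ----

theorem pvRotL_length (l : List Int) : (pvRotL l).length = l.length := by
  cases l <;> simp [pvRotL]

theorem pvFoldIns_length (L : List Int) : ∀ c : List Int,
    (L.foldl (fun c m => pvRotL c ++ [m]) c).length = c.length + L.length := by
  induction L with
  | nil => intro c; simp
  | cons x t ih =>
    intro c
    rw [List.foldl_cons, ih]
    simp [pvRotL_length]
    omega

theorem pvRange_split (a b c : Int) (hab : a ≤ b) (hbc : b ≤ c) :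
    PySem.List.pyRange a c 1 = PySem.List.pyRange a b 1 ++ PySem.List.pyRange b c 1 := by
  rw [PySem.List.pyRange_one, PySem.List.pyRange_one, PySem.List.pyRange_one]
  have h : (c - a).toNat = (b - a).toNat + (c - b).toNat := by omega
  rw [h, List.range_add, List.map_append, List.map_map]
  congr 1
  apply List.map_congr_left
  intro k _
  simp only [Function.comp_apply]
  omega

theorem pvChunk_eq : ∀ (t : Nat) (c : List Int) (m : Int), t ≤ c.length →
    c.drop t ++ pvInterleave (c.take t) (PySem.List.pyRange m (m + (t : Int)) 1)
      = (PySem.List.pyRange m (m + (t : Int)) 1).foldl (fun c m => pvRotL c ++ [m]) c := by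
  intro t
  induction t with
  | zero =>
    intro c m _
    simp only [Nat.cast_zero, add_zero]
    rw [PySem.List.pyRange_one]
    simp [pvInterleave]
  | succ t ih =>
    intro c m ht
    cases c with
    | nil => simp at ht
    | cons h cs =>
      have hcons : PySem.List.pyRange m (m + ((t : Int) + 1)) 1
          = m :: PySem.List.pyRange (m + 1) (m + ((t : Int) + 1)) 1 :=
        PySem.List.pyRange_one_cons (by omega)
      have hrange : PySem.List.pyRange (m + 1) (m + ((t : Int) + 1)) 1
          = PySem.List.pyRange (m + 1) ((m + 1) + (t : Int)) 1 := by
        congr 1; omega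
      have hts : t ≤ cs.length := by simpa using ht
      have hts' : t ≤ (cs ++ [h, m]).length := by simp; omega
      have := ih (cs ++ [h, m]) (m + 1) hts'
      push_cast
      rw [hcons, hrange, List.foldl_cons]
      show (h :: cs).drop (t + 1) ++
          pvInterleave ((h :: cs).take (t + 1)) (m :: PySem.List.pyRange (m + 1) ((m + 1) + (t : Int)) 1)
        = (PySem.List.pyRange (m + 1) ((m + 1) + (t : Int)) 1).foldl
            (fun c m => pvRotL c ++ [m]) (pvRotL (h :: cs) ++ [m])
      have hstep : pvRotL (h :: cs) ++ [m] = cs ++ [h, m] := by simp [pvRotL]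
      rw [hstep, ← this]
      simp only [List.drop_succ_cons, List.take_succ_cons, pvInterleave,
        List.drop_append_of_le_length hts, List.take_append_of_le_length hts]
      simp

-- the inner while loop = fold of single insertions over the run
theorem pvRunB_eq : ∀ (fuel : Nat) (m run_end : Int) (c : List Int), c ≠ [] →
    m ≤ run_end + 1 → (run_end + 1 - m).toNat ≤ fuel →
    pvRunB fuel m run_end c
      = ((PySem.List.pyRange m (run_end + 1) 1).foldl (fun c m => pvRotL c ++ [m]) c,
          run_end + 1) := by
  intro fuel
  induction fuel with
  | zero =>
    intro m run_end c _ hle hf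
    have hm : m = run_end + 1 := by omega
    subst hm
    have : PySem.List.pyRange (run_end + 1) (run_end + 1) 1 = [] := by
      rw [PySem.List.pyRange_one]; simp
    simp [pvRunB, this]
  | succ f ih =>
    intro m run_end c hc hle hf
    by_cases hm : m ≤ run_end
    · have hlen : 1 ≤ c.length := List.length_pos_iff.mpr hc
      simp only [pvRunB, if_pos hm]
      set t : Nat := min c.length (run_end - m + 1).toNat with htdef
      have ht1 : 1 ≤ t := by omega
      have htc : t ≤ c.length := by omega
      have htr : m + (t : Int) ≤ run_end + 1 := by omega
      rw [pvChunk_eq t c m htc]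
      have hsplit := pvRange_split m (m + (t : Int)) (run_end + 1) (by omega) htr
      have hlen' : ((PySem.List.pyRange m (m + (t : Int)) 1).foldl
          (fun c m => pvRotL c ++ [m]) c).length = c.length + t := by
        rw [pvFoldIns_length, PySem.List.length_pyRange_one]; omega
      have hne' : (PySem.List.pyRange m (m + (t : Int)) 1).foldl
          (fun c m => pvRotL c ++ [m]) c ≠ [] := by
        intro h0
        rw [h0] at hlen'; simp at hlen'; omega
      rw [ih (m + (t : Int)) run_end _ hne' htr (by omega), hsplit, List.foldl_append]
    · have hm' : m = run_end + 1 := by omega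
      subst hm'
      have : PySem.List.pyRange (run_end + 1) (run_end + 1) 1 = [] := by
        rw [PySem.List.pyRange_one]; simp
      simp [pvRunB, this, hm]

-- on a run of non-scoring marbles the dict is untouched and the circle folds by insertions
theorem pvFoldB_nonscoring (np : Int) : ∀ (L : List Int) (c : List Int) (P : PySem.Dict Int Int),
    (∀ x ∈ L, PySem.Int.mod x 23 ≠ 0) →
    L.foldl (pvAbsStepB np) (c, P) = (L.foldl (fun c m => pvRotL c ++ [m]) c, P) := by
  intro L
  induction L with
  | nil => intro c P _; rfl
  | cons x t ih =>
    intro c P hall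
    have hx : PySem.Int.mod x 23 ≠ 0 := hall x (by simp)
    simp only [List.foldl_cons]
    rw [show pvAbsStepB np (c, P) x = (pvRotL c ++ [x], P) by
      unfold pvAbsStepB; rw [if_pos hx]]
    exact ih _ P (fun y hy => hall y (by simp [hy]))

-- ---- the scoring slice identities ----

theorem pvTake_eq (l : List Int) (j : Nat) (h1 : 1 ≤ j) (h2 : j ≤ l.length) :
    l.take j = l.take (j - 1) ++ [l[j - 1]] := by
  have hj : j - 1 < l.length := by omega
  conv_lhs => rw [show j = (j - 1) + 1 by omega]
  rw [List.take_add_one, List.getElem?_eq_getElem hj]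
  rfl

theorem pvTake_ne_nil (l : List Int) (j : Nat) (h1 : 1 ≤ j) (h2 : j ≤ l.length) :
    l.take j ≠ [] := by
  intro h0
  have := congrArg List.length h0
  rw [List.length_take, List.length_nil] at this
  omega

theorem pvDrop_eq (l : List Int) (j : Nat) (h1 : 1 ≤ j) (h2 : j ≤ l.length) :
    l.drop (j - 1) = l[j - 1] :: l.drop j := by
  have hj : j - 1 < l.length := by omega
  rw [List.drop_eq_getElem_cons hj]
  congr 2
  omega

theorem pvRotR1_concat (X : List Int) (a : Int) : pvRotR1 (X ++ [a]) = a :: X := by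
  unfold pvRotR1
  rw [List.getLast?_concat]
  simp

theorem pvRotR1_drop_take (l : List Int) (j : Nat) (h1 : 1 ≤ j) (h2 : j ≤ l.length) :
    pvRotR1 (l.drop j ++ l.take j) = l.drop (j - 1) ++ l.take (j - 1) := by
  rw [pvTake_eq l j h1 h2, ← List.append_assoc, pvRotR1_concat,
    pvDrop_eq l j h1 h2]
  simp

theorem pvRotR1_iter_eq : ∀ (k : Nat) (l : List Int), k ≤ l.length →
    pvRotR1^[k] l = l.drop (l.length - k) ++ l.take (l.length - k) := by
  intro k
  induction k with
  | zero => intro l _; simp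
  | succ k ih =>
    intro l hk
    rw [Function.iterate_succ_apply', ih l (by omega)]
    have := pvRotR1_drop_take l (l.length - k) (by omega) (by omega)
    rw [this]
    congr 1 <;> omega

theorem pvScoring_val (l : List Int) (h : 8 ≤ l.length) :
    (PySem.List.pyGet? ((l.drop (l.length - 8)).reverse) 7).getD 0
      = ((pvRotR1^[7] l).getLast?).getD 0 := by
  have h8 : l.length - 8 < l.length := by omega
  have h7' : (7 : Nat) < ((l.drop (l.length - 8)).reverse).length := by
    simp [List.length_drop]; omega
  rw [PySem.List.pyGet?_of_nonneg _ (by norm_num), show ((7:Int).toNat) = 7 from rfl,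
    List.getElem?_eq_getElem h7']
  have hget : ((l.drop (l.length - 8)).reverse)[7] = l[l.length - 8] := by
    rw [List.getElem_reverse, List.getElem_drop]
    congr 1
    simp [List.length_drop]
    omega
  simp only [Option.getD_some, hget]
  rw [pvRotR1_iter_eq 7 l (by omega)]
  have htake : l.take (l.length - 7) = l.take (l.length - 8) ++ [l[l.length - 8]] := by
    conv_lhs => rw [show l.length - 7 = (l.length - 8) + 1 by omega]
    rw [List.take_add_one, List.getElem?_eq_getElem h8]
    rfl
  have hne : l.take (l.length - 7) ≠ [] := pvTake_ne_nil l _ (by omega) (by omega)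
  rw [List.getLast?_append_of_ne_nil _ hne, htake, List.getLast?_concat]
  rfl

theorem pvScoring_circle (l : List Int) (h : 8 ≤ l.length) :
    (((l.drop (l.length - 8)).reverse).take 6).reverse ++ l.take (l.length - 8) ++
        [(PySem.List.pyGet? ((l.drop (l.length - 8)).reverse) 6).getD 0]
      = pvRotL ((pvRotR1^[7] l).dropLast) := by
  have h7 : l.length - 7 < l.length := by omega
  rw [pvRotR1_iter_eq 7 l (by omega)]
  have h8 : l.length - 8 < l.length := by omega
  have htake : l.take (l.length - 7) = l.take (l.length - 8) ++ [l[l.length - 8]] := by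
    conv_lhs => rw [show l.length - 7 = (l.length - 8) + 1 by omega]
    rw [List.take_add_one, List.getElem?_eq_getElem h8]
    rfl
  have hne : l.take (l.length - 7) ≠ [] := pvTake_ne_nil l _ (by omega) (by omega)
  have hdropLast : (l.drop (l.length - 7) ++ l.take (l.length - 7)).dropLast
      = l.drop (l.length - 7) ++ l.take (l.length - 8) := by
    rw [List.dropLast_append_of_ne_nil hne, htake, List.dropLast_concat]
  have hdrop : l.drop (l.length - 7) = l[l.length - 7] :: l.drop (l.length - 6) := by
    rw [List.drop_eq_getElem_cons h7, show l.length - 7 + 1 = l.length - 6 by omega]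
  have h6' : (6 : Nat) < ((l.drop (l.length - 8)).reverse).length := by
    simp [List.length_drop]; omega
  have hget6 : ((l.drop (l.length - 8)).reverse)[6] = l[l.length - 7] := by
    rw [List.getElem_reverse, List.getElem_drop]
    congr 1
    simp [List.length_drop]
    omega
  have hfront : (((l.drop (l.length - 8)).reverse).take 6).reverse = l.drop (l.length - 6) := by
    rw [List.take_reverse, List.reverse_reverse, List.drop_drop]
    congr 1
    simp [List.length_drop]
    omega
  rw [hdropLast, hdrop, hfront, PySem.List.pyGet?_of_nonneg _ (by norm_num),
    show ((6:Int).toNat) = 6 from rfl, List.getElem?_eq_getElem h6', Option.getD_some, hget6]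
  simp [pvRotL]

-- ---- the outer loop computes the fold of abstract B-steps ----

theorem pvLoopB_eq (np lm : Int) : ∀ (fuel : Nat) (m : Int) (c : List Int) (P : PySem.Dict Int Int),
    1 ≤ m → m ≤ lm + 1 → (c.length : Int) = m - 2 * ((m - 1) / 23) →
    (lm + 1 - m).toNat ≤ fuel →
    pvLoopB np fuel m lm c P = ((PySem.List.pyRange m (lm + 1) 1).foldl (pvAbsStepB np) (c, P)).2 := by
  intro fuel
  induction fuel with
  | zero =>
    intro m c P h1 h2 _ hf
    have hm : m = lm + 1 := by omega
    subst hm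
    have : PySem.List.pyRange (lm + 1) (lm + 1) 1 = [] := by
      rw [PySem.List.pyRange_one]; simp
    simp [pvLoopB, this]
  | succ f ih =>
    intro m c P h1 h2 hlen hf
    by_cases hm : m ≤ lm
    · have hdm1 := Int.ediv_add_emod (m - 1) 23
      have hrm1 := Int.emod_nonneg (m - 1) (by norm_num : (23:Int) ≠ 0)
      have hrm1' := Int.emod_lt_of_pos (m - 1) (by norm_num : (0:Int) < 23)
      by_cases h23 : PySem.Int.mod m 23 ≠ 0
      · -- non-scoring run
        have h23' : m % 23 ≠ 0 := by
          rwa [PySem.Int.mod_eq_emod_of_pos (by norm_num)] at h23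
        have hdm := Int.ediv_add_emod m 23
        have hrm := Int.emod_nonneg m (by norm_num : (23:Int) ≠ 0)
        have hrm' := Int.emod_lt_of_pos m (by norm_num : (0:Int) < 23)
        simp only [pvLoopB, if_pos hm, if_pos h23]
        rw [PySem.Int.floordiv_eq_ediv_of_pos (by norm_num)]
        set run_end := min lm (m / 23 * 23 + 22) with hre
        have hmre : m ≤ run_end := by omega
        have hrelm : run_end ≤ lm := by omega
        have hcne : c ≠ [] := by
          intro h0
          rw [h0] at hlen
          simp at hlen
          omega
        rw [pvRunB_eq _ m run_end c hcne (by omega) (le_refl _)]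
        have hall : ∀ x ∈ PySem.List.pyRange m (run_end + 1) 1, PySem.Int.mod x 23 ≠ 0 := by
          intro x hx
          rw [PySem.List.mem_pyRange_one] at hx
          rw [PySem.Int.mod_eq_emod_of_pos (by norm_num)]
          intro hx0
          have hdx := Int.ediv_add_emod x 23
          have : x = 23 * (x / 23) := by omega
          omega
        have hfold := pvFoldB_nonscoring np (PySem.List.pyRange m (run_end + 1) 1) c P hall
        have hsplit := pvRange_split m (run_end + 1) (lm + 1) (by omega) (by omega)
        have hlen1 : (((PySem.List.pyRange m (run_end + 1) 1).foldl
            (fun c m => pvRotL c ++ [m]) c).length : Int) = (run_end + 1) - 2 * ((run_end + 1 - 1) / 23) := by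
          rw [pvFoldIns_length, PySem.List.length_pyRange_one]
          have hq1 : (m - 1) / 23 = m / 23 := by omega
          have hq2 : (run_end + 1 - 1) / 23 = m / 23 := by
            have hd := Int.ediv_add_emod run_end 23
            have := Int.emod_nonneg run_end (by norm_num : (23:Int) ≠ 0)
            have := Int.emod_lt_of_pos run_end (by norm_num : (0:Int) < 23)
            omega
          omega
        rw [ih (run_end + 1) _ P (by omega) (by omega) hlen1 (by omega), hsplit,
          List.foldl_append, hfold]
      · -- scoring marble
        have h23' : m % 23 = 0 := by
          rw [not_ne_iff, PySem.Int.mod_eq_emod_of_pos (by norm_num)] at h23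
          exact h23
        have hq1 : (m - 1) / 23 = m / 23 - 1 := by
          have hdm := Int.ediv_add_emod m 23
          omega
        have hj : 1 ≤ m / 23 := by
          have hdm := Int.ediv_add_emod m 23
          have := Int.emod_nonneg m (by norm_num : (23:Int) ≠ 0)
          omega
        have hlen8 : 8 ≤ c.length := by
          have hdm := Int.ediv_add_emod m 23
          omega
        simp only [pvLoopB, if_pos hm, if_neg h23]
        have hcons : PySem.List.pyRange m (lm + 1) 1 = m :: PySem.List.pyRange (m + 1) (lm + 1) 1 :=
          PySem.List.pyRange_one_cons (by omega)
        have hstep : pvAbsStepB np (c, P) m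
            = (pvRotL ((pvRotR1^[7] c).dropLast),
               P.modify (PySem.Int.mod m np) 0 (· + (m + (((pvRotR1^[7] c).getLast?).getD 0)))) := by
          unfold pvAbsStepB
          rw [if_neg h23]
        have hlen' : ((pvRotL ((pvRotR1^[7] c).dropLast)).length : Int)
            = (m + 1) - 2 * ((m + 1 - 1) / 23) := by
          rw [pvRotL_length, List.length_dropLast]
          have hrl : (pvRotR1^[7] c).length = c.length := by
            rw [pvRotR1_iter_eq 7 c (by omega)]
            simp
          rw [hrl]
          have : (m + 1 - 1) / 23 = m / 23 := by omega
          omega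
        rw [← pvScoring_circle c hlen8] at hlen'
        rw [hcons, List.foldl_cons, hstep,
          ← pvScoring_val c hlen8, ← pvScoring_circle c hlen8]
        exact ih (m + 1) _ _ (by omega) (by omega) hlen' (by omega)
    · have hm' : m = lm + 1 := by omega
      subst hm'
      have : PySem.List.pyRange (lm + 1) (lm + 1) 1 = [] := by
        rw [PySem.List.pyRange_one]; simp
      simp [pvLoopB, this, hm]

-- ===== VERDICT (by name: the statement is the Claim_ definition above) =====
theorem marble_game_spec : Claim_equal_marble_game := by
  intro np lm _ hpre
  obtain ⟨hnp, hlm⟩ := hpre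
  unfold Spec_marble_game marble_game marble_game_alt
  have h0 : pvRepr ([0], []) = [0] := rfl
  have hA := pvFoldA_sim np (PySem.List.pyRange 1 (lm + 1) 1) ([0], []) PySem.Dict.empty
  have hB := pvLoopB_eq np lm lm.toNat 1 [0] PySem.Dict.empty (by omega) (by omega)
    (by norm_num) (by omega)
  have habs := pvFold_comm np (PySem.List.pyRange 1 (lm + 1) 1) [0] PySem.Dict.empty
  rw [h0] at hA
  rw [show pvRotL [0] = [0] from rfl] at habs
  have h1 := congrArg Prod.snd hA
  have h3 := congrArg Prod.snd habs
  simp only at h1 h3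
  have hdict := h1.symm.trans h3.symm
  rw [hB, ← hdict]
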